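-- pv_equiv track=rewrite | github.com/wyk18703232953/myResearch | codeComplex/data copy/filteredData/python/quadratic/python_quadratic_0138.py | generate_grids
-- ===== SOURCE A (Python) =====
-- def generate_grids(n):
--     grids = []
--     for k in range(4):
--         tmp = []
--         for i in range(n):
--             row_chars = []
--             for j in range(n):
--                 val = (i + j + k) % 2
--                 row_chars.append(str(val))
--             tmp.append("".join(row_chars))
--         grids.append(tmp)
--     return grids
-- ===== SOURCE B (Python) =====
-- def generate_grids(n):
--     # Rows are slices of one precomputed repeating pattern; no per-cell loop.
--     pat = "01" * (n + 1)
--     grids = []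
--     for k in range(4):
--         tmp = []
--         for i in range(n):
--             s = (i + k) % 2
--             tmp.append(pat[s:s + n])
--         grids.append(tmp)
--     return grids
-- ===== Notes on version B (the rewrite author's own statement) =====
-- stated objective: simpler
-- what changed: Rows are cut as slices of one precomputed repeating '01' pattern string instead of being assembled character by character with a per-cell modulo loop.
import Mathlib
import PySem

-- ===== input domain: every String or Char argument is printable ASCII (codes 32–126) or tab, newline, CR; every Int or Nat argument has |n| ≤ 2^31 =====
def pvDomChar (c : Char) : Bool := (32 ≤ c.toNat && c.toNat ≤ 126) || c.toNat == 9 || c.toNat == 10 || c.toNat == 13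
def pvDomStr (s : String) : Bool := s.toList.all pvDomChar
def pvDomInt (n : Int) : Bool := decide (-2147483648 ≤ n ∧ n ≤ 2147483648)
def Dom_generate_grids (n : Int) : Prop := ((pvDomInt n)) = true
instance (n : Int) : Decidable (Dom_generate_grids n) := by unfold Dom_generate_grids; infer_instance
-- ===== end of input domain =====

-- B builds each row by slicing one precomputed repeating "01…" pattern instead of
-- assembling it character by character with a per-cell modulo loop (objective: simpler).

-- ===== PORT A =====
def generate_grids (n : Int) : List (List String) :=
  (PySem.List.pyRange 0 4 1).foldl (fun grids k =>
    grids ++ [(PySem.List.pyRange 0 n 1).foldl (fun tmp i =>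
      tmp ++ [PySem.Str.join "" ((PySem.List.pyRange 0 n 1).foldl (fun row_chars j =>
        row_chars ++ [PySem.Int.toStr (PySem.Int.mod (i + j + k) 2)]) [])]) []]) []

-- ===== PORT B =====
-- pat = "01" * (n + 1): Python string repetition, exact as list repetition on code points
def generate_grids_alt (n : Int) : List (List String) :=
  let pat : String := String.ofList (PySem.List.pyRepeat "01".toList (n + 1))
  (PySem.List.pyRange 0 4 1).foldl (fun grids k =>
    grids ++ [(PySem.List.pyRange 0 n 1).foldl (fun tmp i =>
      tmp ++ [PySem.Str.slice pat (some (PySem.Int.mod (i + k) 2))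
                                  (some (PySem.Int.mod (i + k) 2 + n))]) []]) []

-- ===== PRECONDITION & SPEC =====
def Spec_generate_grids (n : Int) (out : List (List String)) : Prop := out = generate_grids_alt n
instance (n : Int) (out : List (List String)) : Decidable (Spec_generate_grids n out) := by unfold Spec_generate_grids; infer_instance

-- ===== CLAIM (what is proved, stated in full; the proofs are below) =====
def Claim_equal_generate_grids : Prop := ∀ (n : Int), Dom_generate_grids n → Spec_generate_grids n (generate_grids n)

-- ===== LEMMAS AND PROOFS =====

lemma pyMod_two (a : Int) : PySem.Int.mod a 2 = a % 2 := by
  simp [PySem.Int.mod, Int.fmod_eq_emod]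

lemma toChars_mod_two (a : Int) :
    PySem.Int.toChars (PySem.Int.mod a 2) = [if a % 2 = 0 then '0' else '1'] := by
  rcases PySem.Int.mod_two_eq a with h | h <;>
    rw [pyMod_two] at h <;> rw [pyMod_two, h] <;> decide

-- pattern "01" repeated M times, as an explicit parity-indexed table
lemma rep01 (M : Nat) :
    (List.replicate M ['0', '1']).flatten
      = (List.range (2 * M)).map (fun t => if t % 2 = 0 then '0' else '1') := by
  induction M with
  | zero => simp
  | succ m ih =>
      have h2 : 2 * (m + 1) = 2 + 2 * m := by omega
      rw [List.replicate_succ, List.flatten_cons, ih, h2, List.range_add, List.map_append,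
        List.map_map]
      congr 1
      apply List.map_congr_left
      intro t _
      simp [Nat.add_mod_left]

lemma drop_take_range_map {α : Type} (f : Nat → α) (L s m : Nat) (h : s + m ≤ L) :
    (((List.range L).map f).drop s).take m = (List.range m).map (fun j => f (s + j)) := by
  apply List.ext_getElem
  · simp; omega
  · intro j h1 h2
    simp

lemma row_eq (n i k : Int) (h0 : 0 ≤ i) (h1 : i < n) :
    PySem.Str.join "" ((PySem.List.pyRange 0 n 1).foldl (fun row_chars j =>
        row_chars ++ [PySem.Int.toStr (PySem.Int.mod (i + j + k) 2)]) [])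
      = PySem.Str.slice (String.ofList (PySem.List.pyRepeat "01".toList (n + 1)))
          (some (PySem.Int.mod (i + k) 2)) (some (PySem.Int.mod (i + k) 2 + n)) := by
  apply String.toList_inj.mp
  have hn : 0 ≤ n := by omega
  set m : Nat := n.toNat with hm
  have hnm : n = (m : Int) := by omega
  -- LHS
  rw [PySem.Str.toList_join, PySem.List.foldl_append_singleton_eq_map, PySem.List.pyRange_one]
  simp only [List.nil_append, List.map_map, Function.comp_def, PySem.Int.toList_toStr]
  -- RHS
  rw [PySem.Str.toList_slice]
  simp only [PySem.Chars.slice_eq_listSlice, String.toList_ofList]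
  have hpat : PySem.List.pyRepeat "01".toList (n + 1)
      = (List.range (2 * (m + 1))).map (fun t => if t % 2 = 0 then '0' else '1') := by
    show (List.replicate (n + 1).toNat _).flatten = _
    rw [show (n + 1).toNat = m + 1 by omega]
    exact rep01 (m + 1)
  rw [hpat, pyMod_two]
  set s : Int := (i + k) % 2 with hs
  have hs0 : 0 ≤ s := Int.emod_nonneg _ (by norm_num)
  have hs1 : s < 2 := Int.emod_lt_of_pos _ (by norm_num)
  have hsn : s = ((s.toNat : Nat) : Int) := by omega
  rw [hsn, show ((s.toNat : Nat) : Int) + n = ((s.toNat : Nat) : Int) + ((m : Nat) : Int) by omega,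
    PySem.List.slice_natCast_add, drop_take_range_map _ _ _ _ (by omega)]
  rw [show (n - 0).toNat = m by omega]
  have hL : ∀ x : Nat, PySem.Int.toChars (PySem.Int.mod (i + (0 + (x : Int)) + k) 2)
      = [if (i + (0 + (x : Int)) + k) % 2 = 0 then '0' else '1'] := fun x => toChars_mod_two _
  simp only [hL]
  have he : ("" : String).toList = ([] : List Char) := rfl
  rw [he, show (List.range m).map
        (fun x : Nat => [if (i + (0 + (x : Int)) + k) % 2 = 0 then '0' else '1'])
      = ((List.range m).map
          (fun x : Nat => if (i + (0 + (x : Int)) + k) % 2 = 0 then '0' else '1')).map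
        (fun c => [c]) by rw [List.map_map]; rfl,
    PySem.Chars.join_nil_singletons]
  apply List.map_congr_left
  intro t _
  split_ifs with ha hb
  · rfl
  · omega
  · omega
  · rfl

lemma inner_eq (n k : Int) :
    (PySem.List.pyRange 0 n 1).foldl (fun tmp i =>
        tmp ++ [PySem.Str.join "" ((PySem.List.pyRange 0 n 1).foldl (fun row_chars j =>
          row_chars ++ [PySem.Int.toStr (PySem.Int.mod (i + j + k) 2)]) [])]) []
      = (PySem.List.pyRange 0 n 1).foldl (fun tmp i =>
        tmp ++ [PySem.Str.slice (String.ofList (PySem.List.pyRepeat "01".toList (n + 1)))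
            (some (PySem.Int.mod (i + k) 2)) (some (PySem.Int.mod (i + k) 2 + n))]) [] := by
  rw [PySem.List.foldl_append_singleton_eq_map, PySem.List.foldl_append_singleton_eq_map]
  apply congrArg
  apply List.map_congr_left
  intro i hi
  rw [PySem.List.mem_pyRange_one] at hi
  exact row_eq n i k hi.1 hi.2

-- ===== VERDICT (by name: the statement is the Claim_ definition above) =====
theorem generate_grids_spec : Claim_equal_generate_grids := by
  intro n _
  show generate_grids n = generate_grids_alt n
  unfold generate_grids generate_grids_alt
  have h4 : PySem.List.pyRange 0 4 1 = [0, 1, 2, 3] := by decide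
  simp only [h4, List.foldl_cons, List.foldl_nil, List.nil_append]
  rw [inner_eq n 0, inner_eq n 1, inner_eq n 2, inner_eq n 3]
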